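-- pv_equiv track=rewrite | github.com/tobiasvonderhaar/CodOpY | CodOpY/analyse.py | report_repeats
-- ===== SOURCE A (Python) =====
-- def report_repeats(seq, threshold=4):
--     '''
--     Reports the repeat length for any single amino acid repeat longer than the threshold value.
--
--     Parameters
--     ==========
--     seq : str
--         The amino acid sequence to be analysed
--     threshold : int
--         The minimum number of consecutive amino acids reported as a repeat. Default = 4.
--
--     Returns
--     =======
--
--     dict
--         A dictionary of amino acids for which repeats were found and the longest repeat length.
--         Returns an empty dictionary if no repeats were found.
--     '''
--
--     ret_dict = {}
--     for aa in seq: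
--         l = threshold
--         while aa * l in seq:
--             ret_dict[aa] = (l,'@')
--             l += 1
--     for key,value in ret_dict.items():
--         ret_dict[key] = (value[0],value[1] + str(seq.index(key*value[0]) + 1))
--     return ret_dict
-- ===== SOURCE B (Python) =====
-- def report_repeats(seq, threshold=4):
--     """Staged linear passes: run-length encode the sequence, keep per amino acid
--     the maximal run length and the start of the first run of that length, then
--     report the ones reaching the threshold."""
--     runs = []  # (aa, start, length); runs[-1] is the run currently being extended
--     pos = 0
--     for ch in seq:
--         if runs and runs[-1][0] == ch:
--             aa, start, length = runs[-1]
--             runs[-1] = (aa, start, length + 1)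
--         else:
--             runs.append((ch, pos, 1))
--         pos += 1
--     best = {}  # aa -> (max run length, start of first run of that length)
--     for aa, start, length in runs:
--         if aa not in best or length > best[aa][0]:
--             best[aa] = (length, start)
--     return {aa: (l, '@' + str(p + 1)) for aa, (l, p) in best.items() if l >= threshold}
-- ===== Notes on version B (the rewrite author's own statement) =====
-- stated objective: faster
-- what changed: Replaced the per-character loop with quadratic substring probes ('aa*l in seq' for growing l, plus seq.index per key) by linear staged passes: run-length encode the sequence once, fold the runs into a per-amino-acid best (max run length, first start), then filter by the threshold.
import Mathlib
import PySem

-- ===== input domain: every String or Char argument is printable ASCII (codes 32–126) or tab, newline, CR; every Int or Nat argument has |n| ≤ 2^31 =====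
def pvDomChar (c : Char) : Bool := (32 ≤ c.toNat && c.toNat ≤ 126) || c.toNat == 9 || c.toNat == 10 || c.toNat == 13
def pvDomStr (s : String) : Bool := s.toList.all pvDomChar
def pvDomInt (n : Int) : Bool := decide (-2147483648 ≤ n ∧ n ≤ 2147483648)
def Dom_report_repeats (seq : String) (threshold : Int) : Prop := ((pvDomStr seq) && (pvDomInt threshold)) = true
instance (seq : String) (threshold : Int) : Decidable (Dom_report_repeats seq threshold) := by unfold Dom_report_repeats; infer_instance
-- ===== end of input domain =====

-- B replaces A's quadratic substring probing by linear staged passes over the run-length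
-- encoding (objective: faster; the equivalence below is about the returned dictionary).


-- ===== PORT A =====
-- A's inner 'while aa * l in seq: ret_dict[aa] = (l, '@'); l += 1'.
-- 'aa * l' for a Python int l is List.replicate l.toNat aa (negative l gives '', exactly Python).
-- Termination: the loop body runs only while the replicate is an infix of cs, so l ≤ len(cs).
def pvAWhile (cs : List Char) (aa : Char) (d : PySem.Dict Char (Int × List Char)) (l : Int) :
    PySem.Dict Char (Int × List Char) :=
  if h : PySem.Chars.isIn (List.replicate l.toNat aa) cs = true then
    pvAWhile cs aa (d.insert aa (l, ['@'])) (l + 1)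
  else d
termination_by ((cs.length : Int) + 1 - l).toNat
decreasing_by
  have hinf := (PySem.Chars.isIn_iff_infix _ _).mp h
  have hlen := List.IsInfix.length_le hinf
  simp only [List.length_replicate] at hlen
  omega

def report_repeats (seq : String) (threshold : Int) : List (String × Int × String) :=
  let cs := seq.toList
  -- first loop: for aa in seq: l = threshold; while aa*l in seq: ret_dict[aa]=(l,'@'); l+=1
  let d1 := cs.foldl (fun d aa => pvAWhile cs aa d threshold) PySem.Dict.empty
  -- second loop: for key,value in ret_dict.items(): ret_dict[key] = (value[0], value[1] + str(seq.index(key*value[0]) + 1))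
  -- seq.index(sub) is ported as PySem.Chars.find: exact here because every stored key satisfies
  -- 'key*value[0] in seq' (the while loop recorded it), and .index equals .find on present substrings.
  let d2 := d1.items.foldl
    (fun d kv =>
      d.insert kv.1
        (kv.2.1, kv.2.2 ++ PySem.Int.toChars (PySem.Chars.find cs (List.replicate kv.2.1.toNat kv.1) + 1)))
    d1
  d2.items.map (fun kv => (String.ofList [kv.1], kv.2.1, String.ofList kv.2.2))

-- ===== PORT B =====
-- Source B keeps the run currently being extended at runs[-1]; the port keeps the runs list
-- REVERSED during the fold (head = last run) and reverses it once at the end.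
def pvBRuns (cs : List Char) : List (Char × Int × Int) :=
  (cs.foldl
    (fun (st : List (Char × Int × Int) × Int) ch =>
      match st.1 with
      | (c, s, l) :: rest =>
          if c == ch then ((c, s, l + 1) :: rest, st.2 + 1)
          else ((ch, st.2, 1) :: (c, s, l) :: rest, st.2 + 1)
      | [] => ([(ch, st.2, 1)], st.2 + 1))
    ([], 0)).1.reverse

-- second pass: for aa, start, length in runs: if aa not in best or length > best[aa][0]: best[aa] = (length, start)
def pvBBest (runs : List (Char × Int × Int)) : PySem.Dict Char (Int × Int) :=
  runs.foldl
    (fun best r =>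
      match best.get? r.1 with
      | none => best.insert r.1 (r.2.2, r.2.1)
      | some v => if v.1 < r.2.2 then best.insert r.1 (r.2.2, r.2.1) else best)
    PySem.Dict.empty

def report_repeats_alt (seq : String) (threshold : Int) : List (String × Int × String) :=
  let best := pvBBest (pvBRuns seq.toList)
  -- {aa: (l, '@' + str(p + 1)) for aa, (l, p) in best.items() if l >= threshold}
  (best.items.filter (fun kv => threshold ≤ kv.2.1)).map
    (fun kv => (String.ofList [kv.1], kv.2.1, String.ofList ('@' :: PySem.Int.toChars (kv.2.2 + 1))))

-- ===== PRECONDITION & SPEC =====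
def Spec_report_repeats (seq : String) (threshold : Int) (out : List (String × Int × String)) : Prop := out = report_repeats_alt seq threshold
instance (seq : String) (threshold : Int) (out : List (String × Int × String)) : Decidable (Spec_report_repeats seq threshold out) := by unfold Spec_report_repeats; infer_instance

-- ===== CLAIM (what is proved, stated in full; the proofs are below) =====
def Claim_equal_report_repeats : Prop := ∀ (seq : String) (threshold : Int), Dom_report_repeats seq threshold → Spec_report_repeats seq threshold (report_repeats seq threshold)

-- ===== LEMMAS AND PROOFS =====

-- maximal run length of c in cs, characterised as the greatest n with c^n an infix
def pvM (c : Char) (cs : List Char) : Nat :=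
  Nat.findGreatest (fun n => List.replicate n c <:+: cs) cs.length

-- start of the first maximal run of c (as the first occurrence of c^(pvM c cs))
def pvS (c : Char) (cs : List Char) : Nat :=
  (PySem.Chars.find cs (List.replicate (pvM c cs) c)).toNat

-- the common canonical value both ports compute
def pvMid (cs : List Char) (th : Int) : List (Char × Int × Int) :=
  ((PySem.List.dedup cs).filter (fun c => decide (th ≤ (pvM c cs : Int)))).map
    (fun c => (c, ((pvM c cs : Int), (pvS c cs : Int))))

def pvRender (kv : Char × Int × Int) : String × Int × String :=
  (String.ofList [kv.1], kv.2.1, String.ofList ('@' :: PySem.Int.toChars (kv.2.2 + 1)))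

theorem le_pvM_iff (c : Char) (cs : List Char) (n : Nat) :
    n ≤ pvM c cs ↔ List.replicate n c <:+: cs := by
  constructor
  · intro h
    have hM : List.replicate (pvM c cs) c <:+: cs := by
      have h0 : (fun n => List.replicate n c <:+: cs) 0 := by simp
      exact Nat.findGreatest_spec (P := fun n => List.replicate n c <:+: cs) (Nat.zero_le _) h0
    refine List.IsInfix.trans (List.IsPrefix.isInfix ?_) hM
    refine ⟨List.replicate (pvM c cs - n) c, ?_⟩
    rw [List.replicate_append_replicate]; congr 1; omega
  · intro h
    have hlen := h.length_le
    simp only [List.length_replicate] at hlen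
    exact Nat.le_findGreatest hlen h

theorem pvM_pos_of_mem {c : Char} {cs : List Char} (h : c ∈ cs) : 1 ≤ pvM c cs := by
  rw [le_pvM_iff]
  have h1 : [c] <:+: cs := by
    obtain ⟨l1, l2, rfl⟩ := List.mem_iff_append.mp h
    exact ⟨l1, l2, by simp⟩
  simpa using h1

theorem replicate_pvM_infix (c : Char) (cs : List Char) :
    List.replicate (pvM c cs) c <:+: cs := (le_pvM_iff c cs _).mp le_rfl

theorem find_pvM_eq_pvS (c : Char) (cs : List Char) :
    PySem.Chars.find cs (List.replicate (pvM c cs) c) = (pvS c cs : Int) := by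
  have h : 0 ≤ PySem.Chars.find cs (List.replicate (pvM c cs) c) :=
    (PySem.Chars.find_nonneg_iff _ _).mpr ((le_pvM_iff c cs _).mp le_rfl)
  unfold pvS
  omega

-- the while-loop guard 'aa * l in seq' holds iff l ≤ pvM
theorem guard_iff (c : Char) (cs : List Char) (l : Int) :
    PySem.Chars.isIn (List.replicate l.toNat c) cs = true ↔ l ≤ (pvM c cs : Int) := by
  rw [PySem.Chars.isIn_iff_infix, ← le_pvM_iff]
  omega

-- A's inner while loop: ends with the single entry (pvM, '@') if it runs at all
theorem pvAWhile_spec (cs : List Char) (aa : Char) (d : PySem.Dict Char (Int × List Char)) (l : Int) :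
    pvAWhile cs aa d l =
      if l ≤ (pvM aa cs : Int) then d.insert aa ((pvM aa cs : Int), ['@']) else d := by
  induction d, l using pvAWhile.induct cs aa with
  | case1 d l h ih =>
    rw [pvAWhile, dif_pos h, ih]
    have hl := (guard_iff aa cs l).mp h
    by_cases h2 : l + 1 ≤ (pvM aa cs : Int)
    · rw [if_pos h2, if_pos hl, PySem.Dict.insert_insert_self]
    · have hle : l = (pvM aa cs : Int) := by omega
      rw [if_neg h2, if_pos hl, hle]
  | case2 d l h =>
    rw [pvAWhile, dif_neg h, if_neg (fun hle => h ((guard_iff aa cs l).mpr hle))]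

-- first-occurrence dedup: accumulator form
theorem pv_contains_eq (s : PySem.Set Char) (x : Char) : PySem.Set.contains s x = decide (x ∈ s) := by
  simp [PySem.Set.contains]

theorem set_update_eq (s : PySem.Set Char) (l : List Char) :
    PySem.Set.update s l = s ++ (PySem.List.dedup l).filter (fun x => !PySem.Set.contains s x) := by
  induction l generalizing s with
  | nil => simp [PySem.Set.update, PySem.List.dedup, PySem.Set.ofList]
  | cons x l ih =>
    have hupd : ∀ t : PySem.Set Char, PySem.Set.update t (x :: l) = PySem.Set.update (PySem.Set.add t x) l := by
      intro t; rfl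
    have hded : PySem.List.dedup (x :: l) = x :: (PySem.List.dedup l).filter (fun y => !(y == x)) := by
      have h0 : PySem.List.dedup (x :: l) = PySem.Set.update [] (x :: l) := by
        simp [PySem.List.dedup_eq_ofList, PySem.Set.ofList_eq_foldl, PySem.Set.update]
      rw [h0, hupd]
      have hadd0 : PySem.Set.add ([] : PySem.Set Char) x = [x] := by
        simp [PySem.Set.add, pv_contains_eq]
      rw [hadd0, ih]
      simp only [List.singleton_append, List.cons.injEq, true_and]
      apply List.filter_congr
      intro y _
      simp only [pv_contains_eq, List.mem_singleton]
      by_cases h : y = x <;> simp [h]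
    rw [hupd, ih, hded]
    by_cases hxs : x ∈ s
    · have hadd : PySem.Set.add s x = s := by simp [PySem.Set.add, pv_contains_eq, hxs]
      rw [hadd]
      simp only [List.filter_cons, pv_contains_eq, hxs, decide_true, Bool.not_true]
      simp only [if_neg (by simp : ¬ (false = true)), List.filter_filter]
      congr 1
      apply List.filter_congr
      intro y _
      by_cases hyx : y = x
      · subst hyx; simp [hxs]
      · simp [hyx]
    · have hadd : PySem.Set.add s x = s ++ [x] := by
        simp [PySem.Set.add, pv_contains_eq, hxs]
      rw [hadd]
      simp only [List.filter_cons, pv_contains_eq, hxs, decide_false, Bool.not_false,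
        if_pos rfl, List.filter_filter, List.append_assoc, List.singleton_append]
      congr 2
      apply List.filter_congr
      intro y _
      by_cases hyx : y = x
      · subst hyx; simp
      · simp [hyx, List.mem_append, hxs]

theorem dedup_append (xs ys : List Char) :
    PySem.List.dedup (xs ++ ys) =
      PySem.List.dedup xs ++ (PySem.List.dedup ys).filter (fun y => !decide (y ∈ xs)) := by
  have h1 : ∀ l : List Char, PySem.List.dedup l = PySem.Set.update [] l := by
    intro l; simp [PySem.List.dedup_eq_ofList, PySem.Set.ofList_eq_foldl, PySem.Set.update]
  have h2 : PySem.Set.update ([] : PySem.Set Char) (xs ++ ys)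
      = PySem.Set.update (PySem.Set.update [] xs) ys := by
    simp [PySem.Set.update, List.foldl_append]
  rw [h1, h2, ← h1, set_update_eq]
  congr 1
  apply List.filter_congr
  intro y _
  simp [pv_contains_eq, PySem.List.mem_dedup]

theorem dedup_append_singleton (xs : List Char) (x : Char) :
    PySem.List.dedup (xs ++ [x]) =
      if x ∈ xs then PySem.List.dedup xs else PySem.List.dedup xs ++ [x] := by
  rw [dedup_append]
  have h : PySem.List.dedup [x] = [x] := by
    simp [PySem.List.dedup_eq_ofList, PySem.Set.ofList_eq_foldl, PySem.Set.add]
  rw [h]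
  by_cases hx : x ∈ xs <;> simp [hx]

-- A's first loop: a fold of key-determined conditional inserts builds the filtered dedup
theorem foldl_insert_if (v : Char → Int × List Char) (P : Char → Bool) (xs : List Char) :
    (xs.foldl (fun d a => if P a then d.insert a (v a) else d) PySem.Dict.empty).items =
      ((PySem.List.dedup xs).filter P).map (fun c => (c, v c)) := by
  induction xs using List.reverseRecOn with
  | nil => simp [PySem.List.dedup, PySem.Set.ofList, PySem.Dict.empty]
  | append_singleton xs x ih =>
    rw [List.foldl_append, List.foldl_cons, List.foldl_nil, dedup_append_singleton]
    set d := xs.foldl (fun d a => if P a then d.insert a (v a) else d) PySem.Dict.empty with hd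
    have hkeys : d.keys = (PySem.List.dedup xs).filter P := by
      show d.items.map Prod.fst = _
      rw [ih, List.map_map]
      simp [Function.comp_def]
    have hcont : d.contains x = decide (x ∈ (PySem.List.dedup xs).filter P) := by
      rw [PySem.Dict.contains_eq_decide_mem_keys, hkeys]
    by_cases hP : P x = true
    · rw [if_pos hP]
      by_cases hx : x ∈ xs
      · have hcx : d.contains x = true := by
          rw [hcont]; simp [List.mem_filter, PySem.List.mem_dedup, hx, hP]
        rw [PySem.Dict.items_insert_of_contains d _ hcx, ih, if_pos hx]
        rw [List.map_map]
        apply List.map_congr_left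
        intro c hc
        have hcmem := (List.mem_filter.mp (hc : c ∈ _)).1
        by_cases hcx2 : c = x
        · subst hcx2; simp
        · simp [Function.comp, hcx2]
      · have hcx : d.contains x = false := by
          rw [hcont]; simp [List.mem_filter, PySem.List.mem_dedup, hx]
        rw [PySem.Dict.items_insert_of_not_contains d _ hcx, ih, if_neg hx]
        simp [List.filter_append, hP]
    · rw [if_neg hP, ih]
      by_cases hx : x ∈ xs
      · rw [if_pos hx]
      · rw [if_neg hx]
        simp [List.filter_append, hP]

-- A's second loop: re-inserting every key of a nodup-key dict maps its items in place
theorem foldl_reinsert (f : Char → Int × List Char → Int × List Char) :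
    ∀ (L Pr : List (Char × (Int × List Char))),
    (((Pr ++ L).map Prod.fst).Nodup) →
    (L.foldl (fun e kv => e.insert kv.1 (f kv.1 kv.2)) (PySem.Dict.mk (Pr ++ L))).items =
      Pr ++ L.map (fun kv => (kv.1, f kv.1 kv.2)) := by
  intro L
  induction L with
  | nil => intro Pr _; simp [PySem.Dict.items]
  | cons kv L ih =>
    intro Pr hnd
    obtain ⟨k, v⟩ := kv
    rw [List.foldl_cons]
    have hcont : (PySem.Dict.mk (Pr ++ (k, v) :: L)).contains k = true := by
      rw [PySem.Dict.contains_iff_mem_keys]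
      show k ∈ (PySem.Dict.mk (Pr ++ (k, v) :: L)).items.map Prod.fst
      simp [PySem.Dict.items]
    have hitems : ((PySem.Dict.mk (Pr ++ (k, v) :: L)).insert k (f k v)).items
        = (Pr ++ [(k, f k v)]) ++ L := by
      rw [PySem.Dict.items_insert_of_contains _ _ hcont]
      show List.map _ (PySem.Dict.mk (Pr ++ (k, v) :: L)).items = _
      have : (PySem.Dict.mk (Pr ++ (k, v) :: L)).items = Pr ++ (k, v) :: L := rfl
      rw [this, List.map_append, List.map_cons]
      simp only [List.map_append, List.map_cons] at hnd
      have hknP : ∀ p ∈ Pr, p.1 ≠ k := by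
        intro p hp hpk
        have : k ∈ Pr.map Prod.fst := by
          exact List.mem_map.mpr ⟨p, hp, hpk⟩
        have := List.disjoint_of_nodup_append hnd
        exact this ‹k ∈ Pr.map Prod.fst› (by simp)
      have hknL : ∀ p ∈ L, p.1 ≠ k := by
        intro p hp hpk
        have h2 := (List.nodup_append.mp hnd).2.1
        rw [List.nodup_cons] at h2
        exact h2.1 (List.mem_map.mpr ⟨p, hp, hpk⟩)
      rw [List.map_congr_left (fun p hp => by
            rw [if_neg]; simp [hknP p hp]),
          List.map_congr_left (l := L) (fun p hp => by
            rw [if_neg]; simp [hknL p hp])]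
      simp
    have hdict : (PySem.Dict.mk (Pr ++ (k, v) :: L)).insert k (f k v)
        = PySem.Dict.mk ((Pr ++ [(k, f k v)]) ++ L) := by
      apply PySem.Dict.ext
      rw [hitems]
    rw [hdict, ih (Pr ++ [(k, f k v)]) (by
      simp only [List.map_append, List.map_cons, List.map_nil] at hnd ⊢
      simpa using hnd)]
    simp

-- ---------- B side ----------

-- reference run-length encoding
def pvSpecRuns : List Char → Int → List (Char × Int × Int)
  | [], _ => []
  | c :: cs, p =>
    (c, p, ((cs.takeWhile (· == c)).length : Int) + 1) ::
      pvSpecRuns (cs.dropWhile (· == c)) (p + (cs.takeWhile (· == c)).length + 1)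
termination_by cs => cs.length
decreasing_by
  have := List.length_dropWhile_le (p := (· == c)) (l := cs)
  simp only [List.length_cons]; omega

-- a run of c' of positive length cannot start inside a block of c ≠ its own char / longer than the block
theorem pv_no_prefix_mid (c c' : Char) (K j : Nat) (rest : List Char)
    (hrest : ∀ hd, rest.head? = some hd → hd ≠ c)
    (hK : 1 ≤ K) (hside : c' ≠ c ∨ j < K) (hj : 1 ≤ j) :
    ¬ List.replicate K c' <+: (List.replicate j c ++ rest) := by
  intro hpre
  by_cases hcc : c' = c
  · subst hcc
    have hjK : j < K := by tauto
    -- the j-th element of the prefix is rest.head = c', contradiction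
    have hlen : K ≤ j + rest.length := by
      have := hpre.length_le
      simpa using this
    have hrne : rest ≠ [] := by
      intro h; subst h; simp at hlen; omega
    have hget := (hpre.getElem (i := j) (by simpa using hjK)).symm
    rw [List.getElem_replicate] at hget
    rw [List.getElem_append_right (by simp)] at hget
    simp only [List.length_replicate, Nat.sub_self] at hget
    have : rest.head? = some c' := by
      rw [← hget, List.head?_eq_getElem?, List.getElem?_eq_getElem]
    exact hrest c' this rfl
  · -- first element of the prefix is c, but the run is of c' ≠ c
    have hget := (hpre.getElem (i := 0) (by simpa using hK)).symm
    rw [List.getElem_replicate, List.getElem_append_left (by simpa using hj)] at hget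
    rw [List.getElem_replicate] at hget
    exact hcc hget.symm

theorem pv_infix_iff_exists_drop (sub s : List Char) :
    sub <:+: s ↔ ∃ j, sub <+: s.drop j := by
  rw [← PySem.Chars.isIn_iff_infix, ← PySem.Chars.exists_prefix_drop_iff_isIn]

theorem pv_drop_block (m j : Nat) (c : Char) (rest : List Char) (h : j ≤ m) :
    (List.replicate m c ++ rest).drop j = List.replicate (m - j) c ++ rest := by
  rw [List.drop_append_of_le_length (by simpa using h), List.drop_replicate]

theorem pv_drop_block_ge (m j : Nat) (c : Char) (rest : List Char) (h : m ≤ j) :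
    (List.replicate m c ++ rest).drop j = rest.drop (j - m) := by
  rw [show j = (List.replicate m c).length + (j - m) by simp; omega, List.drop_append]
  simp [List.drop_of_length_le]

theorem pv_infix_decomp (c c' : Char) (n m : Nat) (rest : List Char)
    (hrest : ∀ hd, rest.head? = some hd → hd ≠ c) (hn : 1 ≤ n) :
    (List.replicate n c' <:+: (List.replicate m c ++ rest))
      ↔ ((c' = c ∧ n ≤ m) ∨ List.replicate n c' <:+: rest) := by
  constructor
  · intro h
    obtain ⟨j, hj⟩ := (pv_infix_iff_exists_drop _ _).mp h
    by_cases hjm : j < m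
    · rw [pv_drop_block m j c rest (by omega)] at hj
      by_cases hcc : c' = c
      · subst hcc
        by_cases hnm : n ≤ m
        · exact Or.inl ⟨rfl, hnm⟩
        · exact absurd hj (pv_no_prefix_mid _ _ n (m - j) rest hrest hn (Or.inr (by omega)) (by omega))
      · exact absurd hj (pv_no_prefix_mid c c' n (m - j) rest hrest hn (Or.inl hcc) (by omega))
    · rw [pv_drop_block_ge m j c rest (by omega)] at hj
      exact Or.inr ((pv_infix_iff_exists_drop _ _).mpr ⟨j - m, hj⟩)
  · rintro (⟨hcc, hnm⟩ | h)
    · subst hcc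
      refine (pv_infix_iff_exists_drop _ _).mpr ⟨0, ?_⟩
      rw [List.drop_zero]
      refine List.IsPrefix.trans ?_ (List.prefix_append _ _)
      exact ⟨List.replicate (m - n) c', by rw [List.replicate_append_replicate]; congr 1; omega⟩
    · exact h.trans (List.suffix_append _ _).isInfix

theorem pvM_ne (c c' : Char) (m : Nat) (rest : List Char)
    (hrest : ∀ hd, rest.head? = some hd → hd ≠ c) (hcc : c' ≠ c) :
    pvM c' (List.replicate m c ++ rest) = pvM c' rest := by
  apply Nat.le_antisymm
  · rcases Nat.eq_zero_or_pos (pvM c' (List.replicate m c ++ rest)) with h | h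
    · omega
    · rw [le_pvM_iff]
      have := (pv_infix_decomp c c' _ m rest hrest h).mp (replicate_pvM_infix c' _)
      tauto
  · rcases Nat.eq_zero_or_pos (pvM c' rest) with h | h
    · omega
    · rw [le_pvM_iff]
      exact (pv_infix_decomp c c' _ m rest hrest h).mpr (Or.inr (replicate_pvM_infix c' rest))

theorem pvM_blk (c : Char) (m : Nat) (rest : List Char)
    (hrest : ∀ hd, rest.head? = some hd → hd ≠ c) :
    pvM c (List.replicate m c ++ rest) = max m (pvM c rest) := by
  apply Nat.le_antisymm
  · rcases Nat.eq_zero_or_pos (pvM c (List.replicate m c ++ rest)) with h | h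
    · omega
    · have := (pv_infix_decomp c c _ m rest hrest h).mp (replicate_pvM_infix c _)
      rcases this with ⟨_, hle⟩ | hinf
      · omega
      · have := (le_pvM_iff c rest _).mpr hinf
        omega
  · apply Nat.max_le.mpr
    constructor
    · rcases Nat.eq_zero_or_pos m with h | h
      · omega
      · rw [le_pvM_iff]
        exact (pv_infix_decomp c c _ m rest hrest h).mpr (Or.inl ⟨rfl, le_rfl⟩)
    · rcases Nat.eq_zero_or_pos (pvM c rest) with h | h
      · omega
      · rw [le_pvM_iff]
        exact (pv_infix_decomp c c _ m rest hrest h).mpr (Or.inr (replicate_pvM_infix c rest))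

theorem pv_find_eq (s sub : List Char) (j : Nat)
    (hj : sub <+: s.drop j) (hmin : ∀ i < j, ¬ sub <+: s.drop i) :
    PySem.Chars.find s sub = (j : Int) := by
  have hinf : sub <:+: s := (pv_infix_iff_exists_drop _ _).mpr ⟨j, hj⟩
  have h0 : 0 ≤ PySem.Chars.find s sub := (PySem.Chars.find_nonneg_iff _ _).mpr hinf
  obtain ⟨hpre, hmin'⟩ := PySem.Chars.find_spec h0
  rcases lt_trichotomy (PySem.Chars.find s sub).toNat j with h | h | h
  · exact absurd hpre (hmin _ h)
  · omega
  · exact absurd hj (hmin' j h)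

theorem pv_find_shift (c c' : Char) (K m : Nat) (rest : List Char)
    (hrest : ∀ hd, rest.head? = some hd → hd ≠ c)
    (hK : 1 ≤ K) (hside : c' ≠ c ∨ m < K)
    (hfound : List.replicate K c' <:+: rest) :
    PySem.Chars.find (List.replicate m c ++ rest) (List.replicate K c')
      = m + PySem.Chars.find rest (List.replicate K c') := by
  have h0 : 0 ≤ PySem.Chars.find rest (List.replicate K c') :=
    (PySem.Chars.find_nonneg_iff _ _).mpr hfound
  obtain ⟨hpre, hmin⟩ := PySem.Chars.find_spec h0
  set j := (PySem.Chars.find rest (List.replicate K c')).toNat with hjdef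
  have hres : PySem.Chars.find (List.replicate m c ++ rest) (List.replicate K c') = ((m + j : Nat) : Int) := by
    apply pv_find_eq
    · rw [pv_drop_block_ge m (m + j) c rest (by omega)]
      simpa using hpre
    · intro i hi hcontra
      by_cases him : i < m
      · rw [pv_drop_block m i c rest (by omega)] at hcontra
        exact pv_no_prefix_mid c c' K (m - i) rest hrest hK
          (hside.imp (fun h => h) (fun h => by omega)) (by omega) hcontra
      · rw [pv_drop_block_ge m i c rest (by omega)] at hcontra
        exact hmin (i - m) (by omega) hcontra
  rw [hres]
  omega

def pvStep (st : List (Char × Int × Int) × Int) (ch : Char) : List (Char × Int × Int) × Int :=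
  match st.1 with
  | (c, s, l) :: rest =>
      if c == ch then ((c, s, l + 1) :: rest, st.2 + 1)
      else ((ch, st.2, 1) :: (c, s, l) :: rest, st.2 + 1)
  | [] => ([(ch, st.2, 1)], st.2 + 1)

theorem pv_absorb (k : Nat) (rest : List Char) (c : Char) (s l p : Int) (stack : List (Char × Int × Int)) :
    (List.replicate k c ++ rest).foldl pvStep ((c, s, l) :: stack, p)
      = rest.foldl pvStep ((c, s, l + k) :: stack, p + k) := by
  induction k generalizing l p with
  | zero => simp
  | succ k ih =>
    rw [List.replicate_succ, List.cons_append, List.foldl_cons]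
    show (List.replicate k c ++ rest).foldl pvStep (pvStep ((c, s, l) :: stack, p) c) = _
    have : pvStep ((c, s, l) :: stack, p) c = ((c, s, l + 1) :: stack, p + 1) := by
      simp [pvStep]
    rw [this, ih]
    have h1 : l + 1 + (k : Int) = l + ((k : Nat) + 1 : Nat) := by push_cast; ring
    have h2 : p + 1 + (k : Int) = p + ((k : Nat) + 1 : Nat) := by push_cast; ring
    rw [h1, h2]

theorem pv_takeWhile_replicate (c : Char) (l : List Char) :
    l.takeWhile (· == c) = List.replicate (l.takeWhile (· == c)).length c := by
  rw [List.eq_replicate_iff]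
  refine ⟨rfl, fun b hb => ?_⟩
  have := List.mem_takeWhile_imp hb
  simpa using this

theorem pv_dropWhile_head (c : Char) (l : List Char) (hd : Char)
    (h : (l.dropWhile (· == c)).head? = some hd) : hd ≠ c := by
  have := List.head?_dropWhile_not (p := (· == c)) (l := l)
  rw [h] at this
  simpa using this

theorem pvG_spec : ∀ (n : Nat) (cs : List Char), cs.length ≤ n → ∀ (stack : List (Char × Int × Int)) (p : Int),
    (∀ hd, cs.head? = some hd → ∀ t, stack.head? = some t → t.1 ≠ hd) →
    (cs.foldl pvStep (stack, p)).1 = (pvSpecRuns cs p).reverse ++ stack := by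
  intro n
  induction n with
  | zero =>
    intro cs hlen stack p _
    have : cs = [] := List.eq_nil_of_length_eq_zero (by omega)
    subst this; simp [pvSpecRuns]
  | succ n ih =>
    intro cs hlen stack p hhead
    match cs with
    | [] => simp [pvSpecRuns]
    | c :: cs' =>
      have hsplit : c :: cs' = c :: (List.replicate (cs'.takeWhile (· == c)).length c ++ cs'.dropWhile (· == c)) := by
        conv_lhs => rw [← List.takeWhile_append_dropWhile (p := (· == c)) (l := cs')]
        rw [← pv_takeWhile_replicate]
      have hfold : (c :: cs').foldl pvStep (stack, p)
          = (List.replicate (cs'.takeWhile (· == c)).length c ++ cs'.dropWhile (· == c)).foldl pvStep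
              (pvStep (stack, p) c) := by
        conv_lhs => rw [hsplit]
        rw [List.foldl_cons]
      rw [hfold]
      have hstep : pvStep (stack, p) c = ((c, p, 1) :: stack, p + 1) := by
        match stack, hhead with
        | [], _ => simp [pvStep]
        | t :: ts, hh =>
          have : t.1 ≠ c := hh c rfl t rfl
          simp [pvStep, this]
      rw [hstep, pv_absorb]
      set k := (cs'.takeWhile (· == c)).length with hk
      set rest := cs'.dropWhile (· == c) with hrest
      have hlen2 : rest.length ≤ n := by
        have h1 : rest.length ≤ cs'.length := List.length_dropWhile_le _ _
        simp only [List.length_cons] at hlen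
        omega
      rw [ih rest hlen2 ((c, p, 1 + (k : Int)) :: stack) (p + 1 + (k : Int))
        (by
          intro hd hhd t ht
          simp only [List.head?_cons, Option.some.injEq] at ht
          subst ht
          exact fun hc => (pv_dropWhile_head c cs' hd hhd) (by simpa using hc.symm) )]
      have hps : pvSpecRuns (c :: cs') p = (c, p, (k : Int) + 1) :: pvSpecRuns rest (p + (k : Int) + 1) := by
        rw [pvSpecRuns]
      rw [hps, List.reverse_cons, List.append_assoc]
      have e1 : p + 1 + (k : Int) = p + (k : Int) + 1 := by ring
      have e2 : (1 : Int) + (k : Int) = (k : Int) + 1 := by ring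
      rw [e1, e2]
      rfl

theorem pvBRuns_eq (cs : List Char) : pvBRuns cs = pvSpecRuns cs 0 := by
  have h : (cs.foldl pvStep ([], 0)).1 = (pvSpecRuns cs 0).reverse ++ [] :=
    pvG_spec cs.length cs le_rfl [] 0 (by intro hd _ t ht; simp at ht)
  show (cs.foldl pvStep ([], 0)).1.reverse = _
  rw [h]
  simp

theorem pvS_ne (c c' : Char) (m : Nat) (rest : List Char)
    (hrest : ∀ hd, rest.head? = some hd → hd ≠ c) (hcc : c' ≠ c) (hpos : 1 ≤ pvM c' rest) :
    pvS c' (List.replicate m c ++ rest) = m + pvS c' rest := by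
  unfold pvS
  rw [pvM_ne c c' m rest hrest hcc,
    pv_find_shift c c' (pvM c' rest) m rest hrest hpos (Or.inl hcc) (replicate_pvM_infix c' rest)]
  have h0 : 0 ≤ PySem.Chars.find rest (List.replicate (pvM c' rest) c') :=
    (PySem.Chars.find_nonneg_iff _ _).mpr (replicate_pvM_infix c' rest)
  omega

theorem pvS_gt (c : Char) (m : Nat) (rest : List Char)
    (hrest : ∀ hd, rest.head? = some hd → hd ≠ c) (hgt : m < pvM c rest) :
    pvM c (List.replicate m c ++ rest) = pvM c rest ∧
    pvS c (List.replicate m c ++ rest) = m + pvS c rest := by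
  have hM : pvM c (List.replicate m c ++ rest) = pvM c rest := by
    rw [pvM_blk c m rest hrest]; omega
  refine ⟨hM, ?_⟩
  unfold pvS
  rw [hM, pv_find_shift c c (pvM c rest) m rest hrest (by omega) (Or.inr hgt) (replicate_pvM_infix c rest)]
  have h0 : 0 ≤ PySem.Chars.find rest (List.replicate (pvM c rest) c) :=
    (PySem.Chars.find_nonneg_iff _ _).mpr (replicate_pvM_infix c rest)
  omega

theorem pvS_le (c : Char) (m : Nat) (rest : List Char)
    (hrest : ∀ hd, rest.head? = some hd → hd ≠ c) (hm : 1 ≤ m) (hle : pvM c rest ≤ m) :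
    pvM c (List.replicate m c ++ rest) = m ∧ pvS c (List.replicate m c ++ rest) = 0 := by
  have hM : pvM c (List.replicate m c ++ rest) = m := by
    rw [pvM_blk c m rest hrest]; omega
  refine ⟨hM, ?_⟩
  unfold pvS
  rw [hM]
  have : PySem.Chars.find (List.replicate m c ++ rest) (List.replicate m c) = ((0 : Nat) : Int) := by
    apply pv_find_eq
    · rw [List.drop_zero]; exact List.prefix_append _ _
    · intro i hi; omega
  rw [this]
  rfl

theorem pv_dedup_replicate (c : Char) (m : Nat) (hm : 1 ≤ m) :
    PySem.List.dedup (List.replicate m c) = [c] := by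
  induction m with
  | zero => omega
  | succ m ih =>
    rcases Nat.eq_zero_or_pos m with h | h
    · subst h
      simp [PySem.List.dedup_eq_ofList, PySem.Set.ofList_eq_foldl, PySem.Set.add]
    · rw [show m + 1 = 1 + m by omega, ← List.replicate_append_replicate, dedup_append, ih h]
      rw [List.filter_eq_nil_iff.mpr (fun a ha => by
        have : a = c := by simpa using ha
        subst this
        simp [List.mem_replicate])]
      simp [PySem.List.dedup_eq_ofList, PySem.Set.ofList_eq_foldl, PySem.Set.add]

theorem pv_dedup_blk (c : Char) (m : Nat) (rest : List Char) (hm : 1 ≤ m) :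
    PySem.List.dedup (List.replicate m c ++ rest)
      = c :: (PySem.List.dedup rest).filter (fun y => !(y == c)) := by
  rw [dedup_append, pv_dedup_replicate c m hm]
  simp only [List.singleton_append, List.cons.injEq, true_and]
  apply List.filter_congr
  intro y _
  by_cases h : y = c
  · simp [h, List.mem_replicate]; omega
  · simp [h, List.mem_replicate]

def pvBStep (best : PySem.Dict Char (Int × Int)) (r : Char × Int × Int) : PySem.Dict Char (Int × Int) :=
  match best.get? r.1 with
  | none => best.insert r.1 (r.2.2, r.2.1)
  | some v => if v.1 < r.2.2 then best.insert r.1 (r.2.2, r.2.1) else best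

theorem pvBF : ∀ (N : Nat) (cs : List Char), cs.length ≤ N → ∀ (p : Int) (d : PySem.Dict Char (Int × Int)),
    d.keys.Nodup → (∀ kv ∈ d.items, 1 ≤ kv.2.1) →
    ((pvSpecRuns cs p).foldl pvBStep d).items =
      d.items.map (fun kv => if (pvM kv.1 cs : Int) ≤ kv.2.1 then kv
        else (kv.1, ((pvM kv.1 cs : Int), p + (pvS kv.1 cs : Int))))
      ++ ((PySem.List.dedup cs).filter (fun x => !d.contains x)).map
          (fun x => (x, ((pvM x cs : Int), p + (pvS x cs : Int)))) := by
  intro N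
  induction N with
  | zero =>
    intro cs hlen p d hnd hval
    have hcs : cs = [] := List.eq_nil_of_length_eq_zero (by omega)
    subst hcs
    rw [show pvSpecRuns [] p = [] by simp [pvSpecRuns]]
    simp only [List.foldl_nil]
    rw [show PySem.List.dedup ([] : List Char) = [] from rfl]
    simp only [List.filter_nil, List.map_nil, List.append_nil]
    rw [List.map_congr_left (fun kv hkv => by
      rw [if_pos]
      have := hval kv hkv
      show (pvM kv.1 [] : Int) ≤ kv.2.1
      unfold pvM
      simp only [List.length_nil, Nat.findGreatest_zero, Nat.cast_zero]
      omega)]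
    simp
  | succ N ih =>
    intro cs hlen p d hnd hval
    match cs with
    | [] =>
      rw [show pvSpecRuns [] p = [] by simp [pvSpecRuns]]
      simp only [List.foldl_nil]
      rw [show PySem.List.dedup ([] : List Char) = [] from rfl]
      simp only [List.filter_nil, List.map_nil, List.append_nil]
      rw [List.map_congr_left (fun kv hkv => by
        rw [if_pos]
        have := hval kv hkv
        show (pvM kv.1 [] : Int) ≤ kv.2.1
        unfold pvM
        simp only [List.length_nil, Nat.findGreatest_zero, Nat.cast_zero]
        omega)]
      simp
    | c :: cs' =>
      -- block decomposition
      set k := (cs'.takeWhile (· == c)).length with hk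
      set rest := cs'.dropWhile (· == c) with hrestdef
      set m := k + 1 with hm
      have hsplit : c :: cs' = List.replicate m c ++ rest := by
        rw [hm, List.replicate_succ, List.cons_append]
        congr 1
        conv_lhs => rw [← List.takeWhile_append_dropWhile (p := (· == c)) (l := cs')]
        rw [pv_takeWhile_replicate]
      have hrest : ∀ hd, rest.head? = some hd → hd ≠ c := fun hd h => pv_dropWhile_head c cs' hd h
      have hlen2 : rest.length ≤ N := by
        have h1 : rest.length ≤ cs'.length := List.length_dropWhile_le _ _
        simp only [List.length_cons] at hlen
        omega
      have hruns : pvSpecRuns (c :: cs') p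
          = (c, p, (k : Int) + 1) :: pvSpecRuns rest (p + (k : Int) + 1) := by
        rw [pvSpecRuns]
      rw [hruns, List.foldl_cons, hsplit]
      have hmInt : ((k : Int) + 1) = ((m : Nat) : Int) := by omega
      have hpInt : (p + (k : Int) + 1) = p + ((m : Nat) : Int) := by omega
      rw [hmInt, hpInt]
      -- the one fold step
      rcases hg : d.get? c with _ | v
      · -- c not yet tracked: the step appends (c, (m, p))
        have hstep : pvBStep d (c, p, ((m : Nat) : Int)) = d.insert c (((m : Nat) : Int), p) := by
          simp [pvBStep, hg]
        have hcont : d.contains c = false := by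
          rw [PySem.Dict.get?_eq_none_iff_contains] at hg
          exact hg
        rw [hstep]
        have hnd' : (d.insert c (((m : Nat) : Int), p)).keys.Nodup :=
          PySem.Dict.nodup_keys_insert d _ _ hnd
        have hval' : ∀ kv ∈ (d.insert c (((m : Nat) : Int), p)).items, 1 ≤ kv.2.1 := by
          intro kv hkv
          rcases (PySem.Dict.mem_items_insert _ _ _ _).mp hkv with h | ⟨h, _⟩
          · subst h; simp; omega
          · exact hval kv h
        rw [ih rest hlen2 _ _ hnd' hval']
        rw [PySem.Dict.items_insert_of_not_contains d _ hcont]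
        rw [List.map_append, List.append_assoc]
        rw [pv_dedup_blk c m rest (by omega)]
        have hfc : List.filter (fun x => !d.contains x)
            (c :: (PySem.List.dedup rest).filter (fun y => !(y == c)))
            = c :: ((PySem.List.dedup rest).filter (fun y => !(y == c))).filter
                (fun x => !d.contains x) := by
          rw [List.filter_cons, hcont]
          simp
        rw [hfc, List.filter_filter]
        dsimp only [List.map_cons, List.map_nil]
        simp only [List.append_nil, List.singleton_append]
        refine congrArg₂ (· ++ ·) ?_ (congrArg₂ List.cons ?_ ?_)
        · -- existing entries: keys differ from c
          apply List.map_congr_left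
          intro kv hkv
          have hne : kv.1 ≠ c := by
            intro h
            have hmem : kv.1 ∈ d.keys := PySem.Dict.mem_keys_of_mem_items d hkv
            rw [h, ← PySem.Dict.contains_iff_mem_keys, hcont] at hmem
            exact Bool.noConfusion hmem
          rw [pvM_ne c kv.1 m rest hrest hne]
          by_cases hcond : (pvM kv.1 rest : Int) ≤ kv.2.1
          · rw [if_pos hcond, if_pos hcond]
          · rw [if_neg hcond, if_neg hcond]
            have hpos : 1 ≤ pvM kv.1 rest := by
              have := hval kv hkv
              omega
            rw [pvS_ne c kv.1 m rest hrest hne hpos]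
            have he : p + ((m : Nat) : Int) + ((pvS kv.1 rest : Nat) : Int)
                = p + (((m + pvS kv.1 rest : Nat) : Nat) : Int) := by omega
            rw [he]
        · -- the new entry for c
          by_cases hcase : pvM c rest ≤ m
          · obtain ⟨hM, hS⟩ := pvS_le c m rest hrest (by omega) hcase
            rw [hM, hS, if_pos (by omega : ((pvM c rest : Nat) : Int) ≤ ((m : Nat) : Int))]
            simp
          · obtain ⟨hM, hS⟩ := pvS_gt c m rest hrest (by omega)
            rw [hM, hS, if_neg (by omega : ¬ ((pvM c rest : Nat) : Int) ≤ ((m : Nat) : Int))]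
            have he : p + ((m : Nat) : Int) + ((pvS c rest : Nat) : Int)
                = p + (((m + pvS c rest : Nat) : Nat) : Int) := by omega
            rw [he]
        · -- untouched new keys
          rw [List.filter_congr (fun x _ => by
            rw [PySem.Dict.contains_insert, Bool.not_or, Bool.and_comm]
            : ∀ x ∈ PySem.List.dedup rest, (!(d.insert c (((m : Nat) : Int), p)).contains x)
                = (!d.contains x && !(x == c)))]
          apply List.map_congr_left
          intro x hx
          have hxmem := List.mem_filter.mp hx
          have hxne : x ≠ c := by
            have h2 := hxmem.2
            simp only [Bool.and_eq_true, Bool.not_eq_true'] at h2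
            intro h
            rw [h] at h2
            simp at h2
          have hxrest : x ∈ rest := (PySem.List.mem_dedup _ _).mp hxmem.1
          rw [pvM_ne c x m rest hrest hxne,
            pvS_ne c x m rest hrest hxne (pvM_pos_of_mem hxrest)]
          have he : p + ((m : Nat) : Int) + ((pvS x rest : Nat) : Int)
              = p + (((m + pvS x rest : Nat) : Nat) : Int) := by omega
          rw [he]
      · -- c already tracked with best value v
        have hcont : d.contains c = true := by
          rw [PySem.Dict.contains_eq_isSome_get?, hg]
          rfl
        have hvmem : (c, v) ∈ d.items := PySem.Dict.mem_items_of_get?_eq_some d hg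
        have hv1 : 1 ≤ v.1 := hval (c, v) hvmem
        have huniq : ∀ kv ∈ d.items, kv.1 = c → kv.2 = v := by
          rintro ⟨k1, v1⟩ hkv hk1
          have h1 : d.get? k1 = some v1 := PySem.Dict.get?_of_mem_items (d := d) hkv hnd
          simp only at hk1
          rw [hk1, hg] at h1
          simpa using h1.symm
        have hfc2 : List.filter (fun x => !d.contains x)
            (c :: (PySem.List.dedup rest).filter (fun y => !(y == c)))
            = ((PySem.List.dedup rest).filter (fun y => !(y == c))).filter
                (fun x => !d.contains x) := by
          rw [List.filter_cons, hcont]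
          simp
        by_cases hrep : v.1 < ((m : Nat) : Int)
        · -- strictly longer first run: replace the entry in place
          have hstep : pvBStep d (c, p, ((m : Nat) : Int)) = d.insert c (((m : Nat) : Int), p) := by
            simp [pvBStep, hg, hrep]
          rw [hstep]
          have hnd' : (d.insert c (((m : Nat) : Int), p)).keys.Nodup :=
            PySem.Dict.nodup_keys_insert d _ _ hnd
          have hval' : ∀ kv ∈ (d.insert c (((m : Nat) : Int), p)).items, 1 ≤ kv.2.1 := by
            intro kv hkv
            rcases (PySem.Dict.mem_items_insert _ _ _ _).mp hkv with h | ⟨h, _⟩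
            · subst h; simp; omega
            · exact hval kv h
          rw [ih rest hlen2 _ _ hnd' hval']
          rw [PySem.Dict.items_insert_of_contains d _ hcont, List.map_map]
          rw [pv_dedup_blk c m rest (by omega), hfc2, List.filter_filter]
          refine congrArg₂ (· ++ ·) ?_ ?_
          · apply List.map_congr_left
            intro kv hkv
            by_cases hkc : kv.1 = c
            · have hkv2 : kv.2 = v := huniq kv hkv hkc
              simp only [Function.comp_def, hkc, BEq.rfl, if_pos]
              by_cases hcase : pvM c rest ≤ m
              · obtain ⟨hM, hS⟩ := pvS_le c m rest hrest (by omega) hcase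
                rw [hM, hS, hkv2]
                rw [if_pos (by omega : ((pvM c rest : Nat) : Int) ≤ ((m : Nat) : Int))]
                rw [if_neg (by omega : ¬ ((m : Nat) : Int) ≤ v.1)]
                simp
              · obtain ⟨hM, hS⟩ := pvS_gt c m rest hrest (by omega)
                rw [hM, hS, hkv2]
                rw [if_neg (by omega : ¬ ((pvM c rest : Nat) : Int) ≤ ((m : Nat) : Int))]
                rw [if_neg (by
                  have : m < pvM c rest := by omega
                  omega : ¬ ((pvM c rest : Nat) : Int) ≤ v.1)]
                have he : p + ((m : Nat) : Int) + ((pvS c rest : Nat) : Int)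
                    = p + (((m + pvS c rest : Nat) : Nat) : Int) := by omega
                rw [he]
            · have hbeq : (kv.1 == c) = false := by
                simp [hkc]
              simp only [Function.comp_def, hbeq, Bool.false_eq_true, if_false]
              rw [pvM_ne c kv.1 m rest hrest hkc]
              by_cases hcond : (pvM kv.1 rest : Int) ≤ kv.2.1
              · rw [if_pos hcond, if_pos hcond]
              · rw [if_neg hcond, if_neg hcond]
                have hpos : 1 ≤ pvM kv.1 rest := by
                  have := hval kv hkv
                  omega
                rw [pvS_ne c kv.1 m rest hrest hkc hpos]
                have he : p + ((m : Nat) : Int) + ((pvS kv.1 rest : Nat) : Int)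
                    = p + (((m + pvS kv.1 rest : Nat) : Nat) : Int) := by omega
                rw [he]
          · rw [List.filter_congr (fun x _ => by
              rw [PySem.Dict.contains_insert, Bool.not_or, Bool.and_comm]
              : ∀ x ∈ PySem.List.dedup rest, (!(d.insert c (((m : Nat) : Int), p)).contains x)
                  = (!d.contains x && !(x == c)))]
            apply List.map_congr_left
            intro x hx
            have hxmem := List.mem_filter.mp hx
            have hxne : x ≠ c := by
              have h2 := hxmem.2
              simp only [Bool.and_eq_true, Bool.not_eq_true'] at h2
              intro h
              rw [h] at h2
              simp at h2
            have hxrest : x ∈ rest := (PySem.List.mem_dedup _ _).mp hxmem.1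
            rw [pvM_ne c x m rest hrest hxne,
              pvS_ne c x m rest hrest hxne (pvM_pos_of_mem hxrest)]
            have he : p + ((m : Nat) : Int) + ((pvS x rest : Nat) : Int)
                = p + (((m + pvS x rest : Nat) : Nat) : Int) := by omega
            rw [he]
        · -- first run not longer: dictionary unchanged
          have hstep : pvBStep d (c, p, ((m : Nat) : Int)) = d := by
            simp [pvBStep, hg, hrep]
          rw [hstep, ih rest hlen2 _ d hnd hval]
          rw [pv_dedup_blk c m rest (by omega), hfc2, List.filter_filter]
          refine congrArg₂ (· ++ ·) ?_ ?_
          · apply List.map_congr_left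
            intro kv hkv
            by_cases hkc : kv.1 = c
            · have hkv2 : kv.2 = v := huniq kv hkv hkc
              rw [hkc, hkv2]
              by_cases hcase : ((pvM c rest : Nat) : Int) ≤ v.1
              · rw [if_pos hcase]
                rw [if_pos (by
                  rw [pvM_blk c m rest hrest]
                  have : ((max m (pvM c rest) : Nat) : Int) = max ((m : Nat) : Int) ((pvM c rest : Nat) : Int) := by
                    push_cast; rfl
                  rw [this]
                  omega : ((pvM c (List.replicate m c ++ rest) : Nat) : Int) ≤ v.1)]
              · have hgt : m < pvM c rest := by omega
                obtain ⟨hM, hS⟩ := pvS_gt c m rest hrest hgt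
                rw [hM, hS, if_neg hcase, if_neg (by omega : ¬ ((pvM c rest : Nat) : Int) ≤ v.1)]
                have he : p + ((m : Nat) : Int) + ((pvS c rest : Nat) : Int)
                    = p + (((m + pvS c rest : Nat) : Nat) : Int) := by omega
                rw [he]
            · rw [pvM_ne c kv.1 m rest hrest hkc]
              by_cases hcond : (pvM kv.1 rest : Int) ≤ kv.2.1
              · rw [if_pos hcond, if_pos hcond]
              · rw [if_neg hcond, if_neg hcond]
                have hpos : 1 ≤ pvM kv.1 rest := by
                  have := hval kv hkv
                  omega
                rw [pvS_ne c kv.1 m rest hrest hkc hpos]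
                have he : p + ((m : Nat) : Int) + ((pvS kv.1 rest : Nat) : Int)
                    = p + (((m + pvS kv.1 rest : Nat) : Nat) : Int) := by omega
                rw [he]
          · rw [List.filter_congr (fun x _ => by
              by_cases hxc : x = c
              · subst hxc
                rw [hcont]
                simp
              · have : (x == c) = false := by simp [hxc]
                rw [this]
                simp
              : ∀ x ∈ PySem.List.dedup rest, (!d.contains x) = (!d.contains x && !(x == c)))]
            apply List.map_congr_left
            intro x hx
            have hxmem := List.mem_filter.mp hx
            have hxne : x ≠ c := by
              have h2 := hxmem.2
              simp only [Bool.and_eq_true, Bool.not_eq_true'] at h2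
              intro h
              rw [h] at h2
              simp at h2
            have hxrest : x ∈ rest := (PySem.List.mem_dedup _ _).mp hxmem.1
            rw [pvM_ne c x m rest hrest hxne,
              pvS_ne c x m rest hrest hxne (pvM_pos_of_mem hxrest)]
            have he : p + ((m : Nat) : Int) + ((pvS x rest : Nat) : Int)
                = p + (((m + pvS x rest : Nat) : Nat) : Int) := by omega
            rw [he]

theorem pvBBest_items (cs : List Char) :
    (pvBBest (pvSpecRuns cs 0)).items =
      (PySem.List.dedup cs).map (fun c => (c, ((pvM c cs : Int), (pvS c cs : Int)))) := by
  have h := pvBF cs.length cs le_rfl 0 PySem.Dict.empty (by simp [PySem.Dict.keys, PySem.Dict.empty])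
    (by intro kv hkv; simp [PySem.Dict.empty, PySem.Dict.items] at hkv)
  show ((pvSpecRuns cs 0).foldl pvBStep PySem.Dict.empty).items = _
  rw [h]
  rw [show PySem.Dict.empty.items = ([] : List (Char × Int × Int)) from rfl]
  rw [List.map_nil, List.nil_append]
  rw [List.filter_congr (fun x _ => by
    rw [PySem.Dict.contains_empty]
    rfl
    : ∀ x ∈ PySem.List.dedup cs, (!PySem.Dict.empty.contains x) = true)]
  rw [List.filter_true]
  apply List.map_congr_left
  intro x _
  rw [zero_add]

-- ---------- assembled ports ----------

theorem portA_eq (seq : String) (threshold : Int) :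
    report_repeats seq threshold = (pvMid seq.toList threshold).map pvRender := by
  unfold report_repeats
  simp only []
  set cs := seq.toList with hcs
  have h1 : (cs.foldl (fun d aa => pvAWhile cs aa d threshold) PySem.Dict.empty).items
      = ((PySem.List.dedup cs).filter (fun c => decide (threshold ≤ (pvM c cs : Int)))).map
          (fun c => (c, ((pvM c cs : Int), (['@'] : List Char)))) := by
    rw [PySem.List.foldl_congr_mem cs _
      (fun d aa => if decide (threshold ≤ (pvM aa cs : Int)) = true
        then d.insert aa ((pvM aa cs : Int), (['@'] : List Char)) else d) _ ?_]
    · exact foldl_insert_if _ _ cs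
    · intro acc x _
      rw [pvAWhile_spec]
      by_cases h : threshold ≤ (pvM x cs : Int) <;> simp [h]
  set d1 := cs.foldl (fun d aa => pvAWhile cs aa d threshold) PySem.Dict.empty with hd1
  have hmk : d1 = PySem.Dict.mk ([] ++ d1.items) := by
    apply PySem.Dict.ext; simp [PySem.Dict.items]
  have hnd : (([] ++ d1.items).map Prod.fst).Nodup := by
    rw [List.nil_append, h1, List.map_map]
    have : (Prod.fst ∘ fun c => (c, ((pvM c cs : Int), (['@'] : List Char)))) = id := by
      funext c; rfl
    rw [this, List.map_id]
    exact (PySem.List.nodup_dedup cs).filter _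
  have h2 : (d1.items.foldl
      (fun d kv => d.insert kv.1
        (kv.2.1, kv.2.2 ++ PySem.Int.toChars (PySem.Chars.find cs (List.replicate kv.2.1.toNat kv.1) + 1)))
      d1).items
      = d1.items.map (fun kv => (kv.1,
          (kv.2.1, kv.2.2 ++ PySem.Int.toChars (PySem.Chars.find cs (List.replicate kv.2.1.toNat kv.1) + 1)))) := by
    conv_lhs => rw [hmk]
    exact foldl_reinsert
      (fun k v => (v.1, v.2 ++ PySem.Int.toChars (PySem.Chars.find cs (List.replicate v.1.toNat k) + 1)))
      d1.items [] hnd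
  rw [h2, h1, List.map_map, List.map_map]
  unfold pvMid
  rw [List.map_map]
  apply List.map_congr_left
  intro c hc
  have hmem : c ∈ cs := (PySem.List.mem_dedup _ _).mp (List.mem_filter.mp hc).1
  simp only [Function.comp_def, pvRender]
  have htn : ((pvM c cs : Int)).toNat = pvM c cs := Int.toNat_natCast _
  rw [htn, find_pvM_eq_pvS]
  rfl

theorem portB_eq (seq : String) (threshold : Int) :
    report_repeats_alt seq threshold = (pvMid seq.toList threshold).map pvRender := by
  unfold report_repeats_alt
  simp only []
  rw [pvBRuns_eq, pvBBest_items, List.filter_map, List.map_map]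
  unfold pvMid
  rw [List.map_map]
  rw [List.filter_congr (fun c _ => rfl
    : ∀ c ∈ PySem.List.dedup seq.toList,
      ((fun kv => decide (threshold ≤ kv.2.1)) ∘ fun c => (c, ((pvM c seq.toList : Int), (pvS c seq.toList : Int)))) c
        = (fun c => decide (threshold ≤ (pvM c seq.toList : Int))) c)]
  rfl

-- ===== VERDICT (by name: the statement is the Claim_ definition above) =====
theorem report_repeats_spec : Claim_equal_report_repeats := by
  intro seq threshold _
  unfold Spec_report_repeats
  rw [portA_eq, portB_eq]
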